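-- pv_equiv track=rewrite | github.com/sp-loomis/PantryApp | backend/dimensions.py | validate_dimension
-- ===== SOURCE A (Python) =====
-- from enum import Enum
--
-- class DimensionType(str, Enum):
--     """Types of dimensions that can be attached to items."""
--     COUNT = "count"
--     WEIGHT = "weight"
--     VOLUME = "volume"
--
-- class WeightUnit(str, Enum):
--     """Weight units with conversion factors to grams (base unit)."""
--     GRAM = "g"
--     KILOGRAM = "kg"
--     OUNCE = "oz"
--     POUND = "lb"
--
-- class VolumeUnit(str, Enum):
--     """Volume units with conversion factors to milliliters (base unit)."""
--     MILLILITER = "ml"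
--     LITER = "l"
--     TEASPOON = "tsp"
--     TABLESPOON = "tbsp"
--     FLUID_OUNCE = "fl oz"
--     CUP = "cup"
--     PINT = "pint"
--     QUART = "quart"
--     GALLON = "gallon"
--
-- def validate_dimension(dimension_type: str, unit: str) -> bool:
--     """Validate that a unit is appropriate for a dimension type."""
--     try:
--         dim_type = DimensionType(dimension_type)
--         if dim_type == DimensionType.COUNT:
--             return unit == "units"
--         elif dim_type == DimensionType.WEIGHT:
--             return unit in [u.value for u in WeightUnit]
--         elif dim_type == DimensionType.VOLUME:
--             return unit in [u.value for u in VolumeUnit]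
--         return False
--     except ValueError:
--         return False
-- ===== SOURCE B (Python) =====
-- # B: flatten the whole validity relation into one list of (dimension, unit) pairs and
-- # linearly scan it — no dispatch on the dimension type at all.
-- _VALID_PAIRS = (
--     [("count", "units")]
--     + [("weight", u) for u in ("g", "kg", "oz", "lb")]
--     + [("volume", u) for u in ("ml", "l", "tsp", "tbsp", "fl oz", "cup", "pint", "quart", "gallon")]
-- )
--
-- def validate_dimension(dimension_type: str, unit: str) -> bool:
--     for d, u in _VALID_PAIRS:
--         if d == dimension_type and u == unit:
--             return True
--     return False
-- ===== Notes on version B (the rewrite author's own statement) =====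
-- stated objective: alternative
-- what changed: Replaces enum construction plus a per-dimension if/elif dispatch with per-call unit lists by a single flat relation of all valid (dimension, unit) pairs scanned linearly, with no dispatch on the dimension type.
import Mathlib
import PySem

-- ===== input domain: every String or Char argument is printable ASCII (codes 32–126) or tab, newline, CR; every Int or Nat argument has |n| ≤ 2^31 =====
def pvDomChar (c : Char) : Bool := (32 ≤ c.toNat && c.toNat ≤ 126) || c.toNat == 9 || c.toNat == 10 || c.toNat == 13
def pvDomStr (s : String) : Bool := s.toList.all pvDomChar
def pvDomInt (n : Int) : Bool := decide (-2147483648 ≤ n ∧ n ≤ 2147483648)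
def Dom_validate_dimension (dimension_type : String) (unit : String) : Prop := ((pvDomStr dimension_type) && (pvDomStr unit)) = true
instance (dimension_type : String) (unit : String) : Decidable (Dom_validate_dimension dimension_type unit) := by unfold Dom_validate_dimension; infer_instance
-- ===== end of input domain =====

-- ===== PORT A =====
-- A: try DimensionType(dimension_type) — succeeds iff the string is one of the three member
-- values — then an if/elif chain, each branch testing membership in a per-call unit list.
def validate_dimension (dimension_type : String) (unit : String) : Bool :=
  if dimension_type == "count" || dimension_type == "weight" || dimension_type == "volume" then
    if dimension_type == "count" then unit == "units"
    else if dimension_type == "weight" then ["g", "kg", "oz", "lb"].contains unit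
    else if dimension_type == "volume" then
      ["ml", "l", "tsp", "tbsp", "fl oz", "cup", "pint", "quart", "gallon"].contains unit
    else false
  else false  -- except ValueError: return False

-- ===== PORT B =====
-- B: one flat relation of all valid (dimension, unit) pairs, scanned linearly.
def pvValidPairs : List (String × String) :=
  [("count", "units")]
  ++ ["g", "kg", "oz", "lb"].map (fun u => ("weight", u))
  ++ ["ml", "l", "tsp", "tbsp", "fl oz", "cup", "pint", "quart", "gallon"].map
      (fun u => ("volume", u))

def pvScanPairs (dimension_type : String) (unit : String) : List (String × String) → Bool
  | [] => false
  | (d, u) :: rest =>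
    if d == dimension_type && u == unit then true else pvScanPairs dimension_type unit rest

def validate_dimension_alt (dimension_type : String) (unit : String) : Bool :=
  pvScanPairs dimension_type unit pvValidPairs

-- ===== PRECONDITION & SPEC =====
def Spec_validate_dimension (dimension_type : String) (unit : String) (out : Bool) : Prop := out = validate_dimension_alt dimension_type unit
instance (dimension_type : String) (unit : String) (out : Bool) : Decidable (Spec_validate_dimension dimension_type unit out) := by unfold Spec_validate_dimension; infer_instance

-- ===== CLAIM (what is proved, stated in full; the proofs are below) =====
def Claim_equal_validate_dimension : Prop := ∀ (dimension_type : String) (unit : String), Dom_validate_dimension dimension_type unit → Spec_validate_dimension dimension_type unit (validate_dimension dimension_type unit)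

-- ===== LEMMAS AND PROOFS =====

-- ===== VERDICT (by name: the statement is the Claim_ definition above) =====
theorem validate_dimension_spec : Claim_equal_validate_dimension := by
  intro dt unit _
  unfold Spec_validate_dimension validate_dimension validate_dimension_alt pvValidPairs
  simp only [pvScanPairs, List.map, List.cons_append, List.nil_append]
  by_cases h1 : dt = "count" <;> by_cases h2 : dt = "weight" <;> by_cases h3 : dt = "volume" <;>
    simp_all [Bool.beq_eq_decide_eq, eq_comm]
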